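-- pv_equiv track=rewrite | github.com/mattgrah-am/code-wars | python/8kyu/Find_Multiples_of_a_Number.py | find_multiples
-- ===== SOURCE A (Python) =====
-- def find_multiples(integer, limit):
--     total_integer = integer
--     result = [integer]
--     while total_integer < limit:
--         total_integer += integer
--         if total_integer <= limit:
--             result.append(total_integer)
--     return result
-- ===== SOURCE B (Python) =====
-- def find_multiples(integer, limit):
--     # No further multiple fits above `integer` itself.
--     if limit <= integer:
--         return [integer]
--     out = []
--     k = limit - limit % integer   # largest multiple of integer not above limit
--     while k > integer:
--         out.append(k)
--         k -= integer
--     out.append(integer)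
--     out.reverse()
--     return out
-- ===== Notes on version B (the rewrite author's own statement) =====
-- stated objective: alternative
-- what changed: Instead of A's ascending accumulate-and-test loop (add integer, check against limit each step), B computes the largest multiple not above limit in O(1) with the modulus, then descends unconditionally from it down to integer building the list back-to-front and reverses once; no per-step limit comparison is maintained.
import Mathlib
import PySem

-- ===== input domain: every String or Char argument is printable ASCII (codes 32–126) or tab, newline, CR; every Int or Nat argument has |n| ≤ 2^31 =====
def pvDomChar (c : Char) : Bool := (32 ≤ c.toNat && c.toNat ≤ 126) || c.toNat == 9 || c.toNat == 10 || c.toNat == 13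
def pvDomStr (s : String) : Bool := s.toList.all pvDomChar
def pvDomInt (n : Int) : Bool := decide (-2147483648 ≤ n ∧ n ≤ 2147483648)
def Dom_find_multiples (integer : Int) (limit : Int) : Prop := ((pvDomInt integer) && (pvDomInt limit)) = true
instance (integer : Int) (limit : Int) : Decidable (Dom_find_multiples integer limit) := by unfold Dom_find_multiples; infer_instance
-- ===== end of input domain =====

-- B replaces A's ascending accumulate-and-test loop by: compute the largest multiple ≤ limit with
-- the modulus, descend from it to integer building the list back-to-front, reverse once;
-- Pre_ excludes the inputs on which A never terminates.


-- ===== PORT A =====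
-- the while loop, with a fuel guard that only makes the same computation total
-- (on Pre_ the fuel chosen below is never exhausted)
def findLoopA (integer limit : Int) : Nat → Int → List Int → List Int
  | 0, _, result => result
  | fuel + 1, total_integer, result =>
    if total_integer < limit then
      let total' := total_integer + integer
      findLoopA integer limit fuel total'
        (if total' ≤ limit then result ++ [total'] else result)
    else result

def find_multiples (integer : Int) (limit : Int) : List Int :=
  findLoopA integer limit ((limit - integer).toNat + 1) integer [integer]

-- ===== PORT B =====
-- Source B's descending while loop, with the same kind of fuel guard (never exhausted on Pre_)
def findLoopB (integer : Int) : Nat → Int → List Int → List Int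
  | 0, _, out => out
  | fuel + 1, k, out =>
    if integer < k then findLoopB integer fuel (k - integer) (out ++ [k]) else out

def find_multiples_alt (integer : Int) (limit : Int) : List Int :=
  if limit ≤ integer then [integer]
  else
    (findLoopB integer ((limit - integer).toNat + 1)
        (limit - PySem.Int.mod limit integer) [] ++ [integer]).reverse

-- ===== PRECONDITION & SPEC =====
-- Pre_ excludes exactly the inputs (integer ≤ 0 and integer < limit) on which A's while loop never
-- terminates (the running total never reaches limit); A returns on every input satisfying Pre_.
def Pre_find_multiples (integer : Int) (limit : Int) : Prop := 0 < integer ∨ limit ≤ integer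
instance (integer : Int) (limit : Int) : Decidable (Pre_find_multiples integer limit) := by
  unfold Pre_find_multiples; infer_instance

def pvWitness_find_multiples : Int × Int := (3, 20)

def Spec_find_multiples (integer : Int) (limit : Int) (out : List Int) : Prop :=
  out = find_multiples_alt integer limit
instance (integer : Int) (limit : Int) (out : List Int) : Decidable (Spec_find_multiples integer limit out) := by
  unfold Spec_find_multiples; infer_instance

-- ===== CLAIM (what is proved, stated in full; the proofs are below) =====
def Claim_equal_find_multiples : Prop :=
  ∀ (integer : Int) (limit : Int), Dom_find_multiples integer limit →
    Pre_find_multiples integer limit →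
    Spec_find_multiples integer limit (find_multiples integer limit)

-- ===== LEMMAS AND PROOFS =====

-- pyRange with positive step: empty when the interval is empty
lemma pyRange_pos_nil (a b s : Int) (hs : 0 < s) (hba : b ≤ a) :
    PySem.List.pyRange a b s = [] := by
  rw [PySem.List.pyRange_of_pos a b hs]
  simp [show ¬ a < b by omega]

-- pyRange with positive step: peel off the first element
lemma pyRange_pos_cons (a b s : Int) (hs : 0 < s) (hab : a < b) :
    PySem.List.pyRange a b s = a :: PySem.List.pyRange (a + s) b s := by
  rw [PySem.List.pyRange_of_pos a b hs, PySem.List.pyRange_of_pos (a + s) b hs]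
  have h1 : (b - a + s - 1) / s = (b - a - 1) / s + 1 := by
    have h := Int.add_mul_ediv_right (b - a - 1) 1 (show s ≠ 0 by omega)
    rw [show b - a + s - 1 = b - a - 1 + 1 * s by ring, h]
  have h0 : 0 ≤ (b - a - 1) / s := Int.ediv_nonneg (by omega) (by omega)
  have hcount : (if a < b then ((b - a + s - 1) / s).toNat else 0)
      = (if a + s < b then ((b - (a + s) + s - 1) / s).toNat else 0) + 1 := by
    by_cases h2 : a + s < b
    · simp only [if_pos hab, if_pos h2, show b - (a + s) + s - 1 = b - a - 1 by ring, h1]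
      omega
    · have hz : (b - a - 1) / s = 0 := Int.ediv_eq_zero_of_lt (by omega) (by omega)
      simp only [if_pos hab, if_neg h2, h1, hz]
      rfl
  rw [hcount, List.range_succ_eq_map]
  simp only [List.map_cons, List.map_map, Nat.cast_zero, mul_zero, add_zero, List.cons.injEq,
    true_and]
  refine List.map_congr_left ?_
  intro k _
  simp only [Function.comp_apply]
  push_cast
  ring

-- pyRange with positive step: peel off the LAST element, when it is reachable from a
lemma pyRange_pos_snoc (a k s : Int) (hs : 0 < s) (hak : a ≤ k) (hdvd : s ∣ k - a) :
    PySem.List.pyRange a (k + 1) s = PySem.List.pyRange a (k - s + 1) s ++ [k] := by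
  obtain ⟨m, hm⟩ := hdvd
  have hm0 : 0 ≤ m := by nlinarith
  rcases eq_or_lt_of_le hm0 with hm0' | hmpos
  · have hk : k = a := by
      have hz : s * m = 0 := by rw [← hm0', mul_zero]
      omega
    rw [pyRange_pos_nil a (k - s + 1) s hs (by omega),
      pyRange_pos_cons a (k + 1) s hs (by omega),
      pyRange_pos_nil (a + s) (k + 1) s hs (by omega)]
    simp [hk]
  · have hsm : s * 1 ≤ s * m := mul_le_mul_of_nonneg_left (by omega) (le_of_lt hs)
    rw [mul_one] at hsm
    have hc1 : (k + 1 - a + s - 1) / s = m + 1 := by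
      have h : k + 1 - a + s - 1 = s * (m + 1) := by rw [mul_add, mul_one]; omega
      rw [h, Int.mul_ediv_cancel_left _ (by omega)]
    have hc2 : (k - s + 1 - a + s - 1) / s = m := by
      have h : k - s + 1 - a + s - 1 = s * m := by omega
      rw [h, Int.mul_ediv_cancel_left _ (by omega)]
    rw [PySem.List.pyRange_of_pos a (k + 1) hs, PySem.List.pyRange_of_pos a (k - s + 1) hs,
      if_pos (show a < k + 1 by omega), if_pos (show a < k - s + 1 by omega), hc1, hc2,
      show (m + 1).toNat = m.toNat + 1 by omega, List.range_succ, List.map_append]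
    simp only [List.map_cons, List.map_nil, List.append_cancel_left_eq, List.cons.injEq, and_true]
    have hmn : (m.toNat : Int) = m := by omega
    rw [hmn]
    omega

-- the loop of A, run with enough fuel, appends exactly the range of remaining multiples
lemma findLoopA_eq_range (integer limit : Int) (hi : 0 < integer) :
    ∀ (fuel : Nat) (total : Int) (res : List Int), (limit - total).toNat < fuel →
      findLoopA integer limit fuel total res
        = res ++ PySem.List.pyRange (total + integer) (limit + 1) integer := by
  intro fuel
  induction fuel with
  | zero => intro total res h; omega
  | succ f ih =>
    intro total res h
    by_cases hlt : total < limit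
    · simp only [findLoopA, if_pos hlt]
      by_cases hle : total + integer ≤ limit
      · rw [if_pos hle, ih (total + integer) (res ++ [total + integer]) (by omega)]
        rw [pyRange_pos_cons (total + integer) (limit + 1) integer hi (by omega)]
        simp
      · rw [if_neg hle]
        have hstop : ∀ r, findLoopA integer limit f (total + integer) r = r := by
          intro r
          cases f with
          | zero => rfl
          | succ f' => simp only [findLoopA, if_neg (show ¬ total + integer < limit by omega)]
        rw [hstop, pyRange_pos_nil (total + integer) (limit + 1) integer hi (by omega)]
        simp
    · simp only [findLoopA, if_neg hlt]
      rw [pyRange_pos_nil (total + integer) (limit + 1) integer hi (by omega)]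
      simp

-- the loop of B, run with enough fuel from a multiple k of integer, appends the multiples
-- 2*integer … k in DESCENDING order
lemma findLoopB_eq_range (integer : Int) (hi : 0 < integer) :
    ∀ (fuel : Nat) (k : Int) (out : List Int), integer ∣ k → (k - integer).toNat < fuel →
      findLoopB integer fuel k out
        = out ++ (PySem.List.pyRange (2 * integer) (k + 1) integer).reverse := by
  intro fuel
  induction fuel with
  | zero => intro k out _ h; omega
  | succ f ih =>
    intro k out hdvd h
    by_cases hlt : integer < k
    · obtain ⟨m, hm⟩ := hdvd
      have hm2 : 2 ≤ m := by
        by_contra hc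
        have := mul_le_mul_of_nonneg_left (show m ≤ 1 by omega) (le_of_lt hi)
        rw [mul_one] at this
        omega
      have h2i : 2 * integer ≤ k := by
        have := mul_le_mul_of_nonneg_left hm2 (le_of_lt hi)
        omega
      simp only [findLoopB, if_pos hlt]
      rw [ih (k - integer) (out ++ [k]) ⟨m - 1, by rw [mul_sub, mul_one]; omega⟩ (by omega)]
      rw [pyRange_pos_snoc (2 * integer) k integer hi (by omega)
        ⟨m - 2, by rw [mul_sub]; omega⟩]
      simp
    · simp only [findLoopB, if_neg hlt]
      rw [pyRange_pos_nil (2 * integer) (k + 1) integer hi (by omega)]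
      simp

-- ===== VERDICT (by name: the statement is the Claim_ definition above) =====
theorem find_multiples_spec : Claim_equal_find_multiples := by
  intro integer limit _ hpre
  unfold Spec_find_multiples find_multiples find_multiples_alt
  by_cases hle : limit ≤ integer
  · rw [if_pos hle]
    simp only [findLoopA, if_neg (show ¬ integer < limit by omega)]
  · rw [if_neg hle]
    have hi : 0 < integer := by
      rcases hpre with h | h
      · exact h
      · omega
    -- facts about the Python modulus (fmod) for a positive divisor
    have hmod : PySem.Int.mod limit integer = limit.fmod integer := rfl
    have hr0 : 0 ≤ limit.fmod integer := Int.fmod_nonneg_of_pos limit hi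
    have hrlt : limit.fmod integer < integer := Int.fmod_lt_of_pos limit hi
    have hdec : integer * limit.fdiv integer + limit.fmod integer = limit :=
      Int.mul_fdiv_add_fmod limit integer
    set r := limit.fmod integer with hrdef
    set q := limit.fdiv integer with hqdef
    have hq1 : 1 ≤ q := by
      by_contra hc
      have := mul_nonpos_of_nonneg_of_nonpos (le_of_lt hi) (show q ≤ 0 by omega)
      omega
    have hdvd : integer ∣ limit - r := ⟨q, by omega⟩
    rw [hmod]
    rw [findLoopA_eq_range integer limit hi ((limit - integer).toNat + 1) integer [integer]
      (by omega)]
    rw [findLoopB_eq_range integer hi ((limit - integer).toNat + 1) (limit - r) [] hdvd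
      (by omega)]
    simp only [List.nil_append, List.reverse_append, List.reverse_cons, List.reverse_nil,
      List.nil_append, List.reverse_reverse, List.cons_append]
    -- remains: [i] ++ pyRange (2i) (limit+1) i = i :: pyRange (2i) (limit - r + 1) i
    have hcount : PySem.List.pyRange (2 * integer) (limit + 1) integer
        = PySem.List.pyRange (2 * integer) (limit - r + 1) integer := by
      rw [PySem.List.pyRange_of_pos _ _ hi, PySem.List.pyRange_of_pos _ _ hi]
      by_cases h2 : 2 ≤ q
      · have hge : 2 * integer ≤ limit - r := by
          have := mul_le_mul_of_nonneg_left h2 (le_of_lt hi)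
          omega
        rw [if_pos (by omega), if_pos (by omega)]
        have hc1 : (limit + 1 - 2 * integer + integer - 1) / integer = q - 1 := by
          rw [show limit + 1 - 2 * integer + integer - 1 = r + integer * (q - 1) by
            rw [mul_sub, mul_one]; omega]
          rw [Int.add_mul_ediv_left _ _ (show integer ≠ 0 by omega),
            Int.ediv_eq_zero_of_lt hr0 hrlt]
          omega
        have hc2 : (limit - r + 1 - 2 * integer + integer - 1) / integer = q - 1 := by
          rw [show limit - r + 1 - 2 * integer + integer - 1 = integer * (q - 1) by
            rw [mul_sub, mul_one]; omega]
          exact Int.mul_ediv_cancel_left _ (by omega)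
        rw [hc1, hc2]
      · have hq : q = 1 := by omega
        have hiq : integer * q = integer := by rw [hq, mul_one]
        rw [if_neg (show ¬ 2 * integer < limit + 1 by omega),
          if_neg (show ¬ 2 * integer < limit - r + 1 by omega)]
    rw [two_mul] at hcount
    rw [hcount, two_mul]
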